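-- pv_equiv track=rewrite | github.com/maggawron/Advent_of_code_2020 | Task_10_1.py | best_result
-- ===== SOURCE A (Python) =====
-- def best_result(line):
--
--     prev = 0
--     count_1 = 0
--     count_3 = 0
--     line.sort()
--     line.append(line[-1] + 3)
--
--
--     for el in line:
--         if el-prev == 1:
--             count_1 += 1
--         if el-prev == 3:
--             count_3 += 1
--         prev = el
--
--     return count_1 * count_3
-- ===== SOURCE B (Python) =====
-- def best_result(line):
--     s = set(line)
--     c1 = sum(x + 1 in s for x in s) + (min(s) == 1)
--     c3 = sum(x + 3 in s and x + 1 not in s and x + 2 not in s for x in s) + (min(s) == 3) + 1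
--     return c1 * c3
-- ===== Notes on version B (the rewrite author's own statement) =====
-- stated objective: alternative
-- what changed: A sorts the list, appends a sentinel and counts 1- and 3-gaps in one stateful scan with a prev variable; B never sorts or scans adjacent pairs at all: it builds a set and counts, by pure membership tests, the elements x with x+1 present (gap-1 pairs) and the elements x with x+3 present but x+1 and x+2 absent (gap-3 pairs), adding indicator terms for the implicit 0-outlet and the final +3 sentinel.
-- outside the precondition, e.g. on best_result([]): A raises IndexError, B raises ValueError
import Mathlib
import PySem

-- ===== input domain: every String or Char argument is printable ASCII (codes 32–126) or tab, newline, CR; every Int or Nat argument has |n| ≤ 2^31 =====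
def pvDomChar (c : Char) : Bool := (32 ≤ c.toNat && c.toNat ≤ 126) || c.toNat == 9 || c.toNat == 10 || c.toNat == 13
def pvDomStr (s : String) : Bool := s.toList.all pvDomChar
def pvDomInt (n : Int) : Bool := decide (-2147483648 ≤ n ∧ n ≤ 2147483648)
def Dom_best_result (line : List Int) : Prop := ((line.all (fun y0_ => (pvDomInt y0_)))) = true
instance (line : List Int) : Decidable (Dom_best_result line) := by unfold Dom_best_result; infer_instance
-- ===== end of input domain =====

-- B replaces A's sort + single stateful gap-scan by order-free set-membership counting (no sort, no adjacency
-- scan); equivalence is about the RETURN value only: A sorts/appends to its argument in place, B does not mutate.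

-- ===== PORT A =====
-- loop body of A: state (prev, count_1, count_3), the two if-tests and prev = el
def pvStep (st : Int × Int × Int) (el : Int) : Int × Int × Int :=
  let c1 := if el - st.1 == 1 then st.2.1 + 1 else st.2.1
  let c3 := if el - st.1 == 3 then st.2.2 + 1 else st.2.2
  (el, c1, c3)

def best_result (line : List Int) : Int :=
  let s := PySem.List.sorted line (fun x => x) false
  let line2 := s ++ [((PySem.List.pyGet? s (-1)).getD 0) + 3]
  let r := line2.foldl pvStep (0, 0, 0)
  r.2.1 * r.2.2

-- ===== PORT B =====
def best_result_alt (line : List Int) : Int :=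
  let s : PySem.Set Int := PySem.Set.ofList line
  let c1 : Int := (s.countP (fun x => PySem.Set.contains s (x + 1)) : Int)
    + (if ((PySem.List.min? s (fun x => x)).getD 0) = 1 then 1 else 0)
  let c3 : Int := (s.countP (fun x => PySem.Set.contains s (x + 3)
        && !PySem.Set.contains s (x + 1) && !PySem.Set.contains s (x + 2)) : Int)
    + (if ((PySem.List.min? s (fun x => x)).getD 0) = 3 then 1 else 0) + 1
  c1 * c3

-- ===== PRECONDITION & SPEC =====
-- Pre_ excludes only the empty list, on which A raises IndexError (line[-1]) and B raises ValueError (min of an empty set).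
def Pre_best_result (line : List Int) : Prop := line ≠ []
instance (line : List Int) : Decidable (Pre_best_result line) := by unfold Pre_best_result; infer_instance
def pvWitness_best_result : List Int := [1, 4, 5, 6, 7, 10]
def Spec_best_result (line : List Int) (out : Int) : Prop := out = best_result_alt line
instance (line : List Int) (out : Int) : Decidable (Spec_best_result line out) := by unfold Spec_best_result; infer_instance

-- ===== CLAIM (what is proved, stated in full; the proofs are below) =====
def Claim_equal_best_result : Prop := ∀ (line : List Int), Dom_best_result line → Pre_best_result line → Spec_best_result line (best_result line)

-- ===== LEMMAS AND PROOFS =====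

-- number of adjacent pairs of M at distance k
def adjCount (k : Int) : List Int → Nat
  | [] => 0
  | [_] => 0
  | a :: b :: t => (if b - a = k then 1 else 0) + adjCount k (b :: t)

-- the set-side count: elements x with x+k present and nothing strictly between
def pvSetCount (k : Int) (S : Finset Int) : Nat :=
  (S.filter (fun x => x + k ∈ S ∧ ∀ j ∈ PySem.List.pyRange 1 k 1, x + j ∉ S)).card

-- A's loop computes adjCount 1 and adjCount 3 of prev :: l
theorem pvLoopInv (l : List Int) : ∀ (prev c1 c3 : Int),
    (l.foldl pvStep (prev, c1, c3)).2.1 = c1 + (adjCount 1 (prev :: l) : Int)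
  ∧ (l.foldl pvStep (prev, c1, c3)).2.2 = c3 + (adjCount 3 (prev :: l) : Int) := by
  induction l with
  | nil => intro prev c1 c3; simp [List.foldl, adjCount]
  | cons x t ih =>
    intro prev c1 c3
    have h := ih x (if x - prev == 1 then c1 + 1 else c1) (if x - prev == 3 then c3 + 1 else c3)
    constructor
    · simp only [List.foldl, pvStep, adjCount, h.1]
      by_cases h1 : x - prev = 1 <;> simp [h1] <;> try ring
    · simp only [List.foldl, pvStep, adjCount, h.2]
      by_cases h3 : x - prev = 3 <;> simp [h3] <;> try ring


-- on a weakly sorted list, adjCount k is the set count (0 < k)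
theorem pvAdjChar (k : Int) (hk : 0 < k) : ∀ (M : List Int), M.Pairwise (· ≤ ·) →
    adjCount k M = pvSetCount k M.toFinset := by
  intro M
  induction M with
  | nil => intro _; simp [adjCount, pvSetCount]
  | cons a M ih =>
    intro hp
    rcases List.pairwise_cons.mp hp with ⟨hale, hpM⟩
    cases M with
    | nil =>
      simp [adjCount, pvSetCount, Finset.filter_singleton]
      rw [if_neg (by rintro ⟨h0, _⟩; omega)]
      simp
    | cons b t =>
      have ihbt := ih hpM
      have hab : a ≤ b := hale b (by simp)
      have hble : ∀ y ∈ b :: t, b ≤ y := by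
        intro y hy
        rcases List.mem_cons.mp hy with rfl | hyt
        · exact le_refl _
        · exact (List.pairwise_cons.mp hpM).1 y hyt
      set F := (b :: t).toFinset with hF
      have hbF : b ∈ F := by simp [hF]
      have hFle : ∀ x ∈ F, b ≤ x := by
        intro x hx
        exact hble x (List.mem_toFinset.mp hx)
      by_cases hab' : a = b
      · -- duplicate head: finsets coincide, pair contributes 0
        have h0 : (a :: b :: t).toFinset = F := by
          simp [hF, hab']
        have : (if b - a = k then 1 else 0) = 0 := by
          rw [if_neg]; omega
        simp only [adjCount, this, Nat.zero_add, h0, ihbt]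
      · have halt : a < b := lt_of_le_of_ne hab hab'
        have haF : a ∉ F := by
          intro h
          have := hFle a h
          omega
        have hins : (a :: b :: t).toFinset = insert a F := by simp [hF]
        -- membership stability for elements of F
        have hstab : ∀ x ∈ F, ∀ j : Int, 0 < j → (x + j ∈ insert a F ↔ x + j ∈ F) := by
          intro x hx j hj
          have hbx := hFle x hx
          constructor
          · intro h
            rcases Finset.mem_insert.mp h with h' | h'
            · omega
            · exact h'
          · intro h; exact Finset.mem_insert_of_mem h
        -- the head qualifies iff b = a + k
        have hhead : ((a + k ∈ insert a F ∧ ∀ j ∈ PySem.List.pyRange 1 k 1, a + j ∉ insert a F) ↔ b = a + k) := by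
          constructor
          · rintro ⟨h1, h2⟩
            rcases Finset.mem_insert.mp h1 with h' | h'
            · omega
            · have hbk : b ≤ a + k := hFle _ h'
              by_contra hne
              have hblt : b < a + k := lt_of_le_of_ne hbk hne
              have : a + (b - a) ∉ insert a F := by
                apply h2
                rw [PySem.List.mem_pyRange_one]
                omega
              apply this
              apply Finset.mem_insert_of_mem
              simpa using hbF
          · intro hbk
            refine ⟨Finset.mem_insert_of_mem (by rw [← hbk]; exact hbF), ?_⟩
            intro j hj
            rw [PySem.List.mem_pyRange_one] at hj
            intro hmem
            rcases Finset.mem_insert.mp hmem with h' | h'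
            · omega
            · have := hFle _ h'
              omega
        -- filter over F is unchanged by inserting a
        have hfilt : F.filter (fun x => x + k ∈ insert a F ∧ ∀ j ∈ PySem.List.pyRange 1 k 1, x + j ∉ insert a F)
            = F.filter (fun x => x + k ∈ F ∧ ∀ j ∈ PySem.List.pyRange 1 k 1, x + j ∉ F) := by
          apply Finset.filter_congr
          intro x hx
          have h1 := hstab x hx k hk
          constructor
          · rintro ⟨hA, hB⟩
            refine ⟨(h1).mp hA, ?_⟩
            intro j hj hmem
            rw [PySem.List.mem_pyRange_one] at hj
            exact hB j (by rw [PySem.List.mem_pyRange_one]; omega) ((hstab x hx j (by omega)).mpr hmem)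
          · rintro ⟨hA, hB⟩
            refine ⟨(h1).mpr hA, ?_⟩
            intro j hj hmem
            rw [PySem.List.mem_pyRange_one] at hj
            exact hB j (by rw [PySem.List.mem_pyRange_one]; omega) ((hstab x hx j (by omega)).mp hmem)
        -- assemble
        rw [show adjCount k (a :: b :: t) = (if b - a = k then 1 else 0) + adjCount k (b :: t) from rfl,
          ihbt]
        unfold pvSetCount
        rw [hins, Finset.filter_insert, hfilt]
        by_cases hbk : b = a + k
        · rw [if_pos (hhead.mpr hbk), if_pos (by omega)]
          rw [Finset.card_insert_of_notMem (fun hmem => haF (Finset.mem_filter.mp hmem).1)]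
          omega
        · rw [if_neg (fun h => hbk (hhead.mp h)), if_neg (by omega)]
          omega


-- every member of a (· ≤ ·)-pairwise list is at most its last element
theorem pvLe_getLast (L : List Int) (h : L ≠ []) (hs : L.Pairwise (· ≤ ·)) :
    ∀ y ∈ L, y ≤ L.getLast h := by
  induction L with
  | nil => simp at h
  | cons a t ih =>
    intro y hy
    rcases List.pairwise_cons.mp hs with ⟨ha, ht⟩
    by_cases hte : t = []
    · subst hte; simp at hy; simp [hy]
    · rw [List.getLast_cons hte]
      rcases List.mem_cons.mp hy with rfl | hyt
      · exact ha _ (List.getLast_mem hte)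
      · exact ih hte ht y hyt


-- the sentinel algebra, k = 1
theorem pvF1 (T : Finset Int) (m : Int) (hub : ∀ x ∈ T, x ≤ m) :
    pvSetCount 1 (insert (m + 3) T) = (T.filter (fun x => x + 1 ∈ T)).card := by
  unfold pvSetCount
  congr 1
  ext x
  simp only [Finset.mem_filter, Finset.mem_insert, PySem.List.mem_pyRange_one]
  constructor
  · rintro ⟨hx, h1, _⟩
    rcases hx with rfl | hxT
    · rcases h1 with h | h
      · omega
      · exact absurd (hub _ h) (by omega)
    · refine ⟨hxT, ?_⟩
      rcases h1 with h | h
      · have := hub x hxT; omega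
      · exact h
  · rintro ⟨hxT, h1⟩
    exact ⟨Or.inr hxT, Or.inr h1, by intro j hj; omega⟩


-- the sentinel algebra, k = 3: the pair (m, m+3) contributes exactly 1
theorem pvF3 (T : Finset Int) (m : Int) (hm : m ∈ T) (hub : ∀ x ∈ T, x ≤ m) :
    pvSetCount 3 (insert (m + 3) T)
      = (T.filter (fun x => x + 3 ∈ T ∧ x + 1 ∉ T ∧ x + 2 ∉ T)).card + 1 := by
  unfold pvSetCount
  have hkey : (insert (m + 3) T).filter
      (fun x => x + 3 ∈ insert (m + 3) T ∧ ∀ j ∈ PySem.List.pyRange 1 3 1, x + j ∉ insert (m + 3) T)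
      = insert m (T.filter (fun x => x + 3 ∈ T ∧ x + 1 ∉ T ∧ x + 2 ∉ T)) := by
    ext x
    simp only [Finset.mem_filter, Finset.mem_insert, PySem.List.mem_pyRange_one]
    constructor
    · rintro ⟨hx, h3, hmid⟩
      rcases hx with rfl | hxT
      · exfalso
        rcases h3 with h | h
        · omega
        · exact absurd (hub _ h) (by omega)
      · by_cases hxm : x = m
        · exact Or.inl hxm
        · right
          refine ⟨hxT, ?_, ?_, ?_⟩
          · rcases h3 with h | h
            · omega
            · exact h
          · intro h; exact hmid 1 (by omega) (Or.inr h)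
          · intro h; exact hmid 2 (by omega) (Or.inr h)
    · rintro (rfl | ⟨hxT, h3, h1, h2⟩)
      · refine ⟨Or.inr hm, Or.inl rfl, ?_⟩
        intro j hj
        rintro (h | h)
        · omega
        · exact absurd (hub _ h) (by omega)
      · refine ⟨Or.inr hxT, Or.inr h3, ?_⟩
        intro j hj
        have hx := hub x hxT
        rintro (h | h)
        · omega
        · have : j = 1 ∨ j = 2 := by omega
          rcases this with rfl | rfl
          · exact h1 h
          · exact h2 h
  rw [hkey, Finset.card_insert_of_notMem]
  intro h
  rcases Finset.mem_filter.mp h with ⟨_, h3, _⟩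
  exact absurd (hub _ h3) (by omega)


-- countP over a nodup list as a Finset filter card
theorem pvCountP_card (s : List Int) (hnd : s.Nodup) (p : Int → Bool) :
    s.countP p = (s.toFinset.filter (fun x => p x = true)).card := by
  rw [← List.toFinset_filter, List.card_toFinset, (hnd.filter p).dedup, List.countP_eq_length_filter]


-- the two ports agree on every nonempty list
theorem pvMain (line : List Int) (hne : line ≠ []) : best_result line = best_result_alt line := by
  unfold best_result best_result_alt
  dsimp only
  set L := PySem.List.sorted line (fun x => x) false with hLdef
  have hLne : L ≠ [] := by
    rw [hLdef, Ne, PySem.List.sorted_eq_nil_iff]; exact hne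
  have hLsort : L.Pairwise (· ≤ ·) := by
    simpa using PySem.List.sorted_pairwise line (fun x => x)
  set m := L.getLast hLne with hmdef
  have hget : ((PySem.List.pyGet? L (-1)).getD 0) = m := by
    rw [PySem.List.pyGet?_neg_one, List.getLast?_eq_some_getLast hLne]
    rfl
  rw [hget]
  set C := L ++ [m + 3] with hCdef
  have hCsort : C.Pairwise (· ≤ ·) := by
    refine List.pairwise_append.mpr ⟨hLsort, by simp, ?_⟩
    intro y hy z hz
    simp only [List.mem_singleton] at hz
    subst hz
    have := pvLe_getLast L hLne hLsort y hy
    omega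
  obtain ⟨x, t, hLx⟩ := List.exists_cons_of_ne_nil hLne
  have hfold := pvLoopInv C 0 0 0
  rw [hfold.1, hfold.2]
  -- split off the initial pair (0, x)
  have hC0 : ∀ k : Int, adjCount k ((0:Int) :: C) = (if x - 0 = k then 1 else 0) + adjCount k C := by
    intro k
    rw [hCdef, hLx]
    rfl
  -- finsets
  have hLT : L.toFinset = line.toFinset := by
    ext y
    simp [hLdef, PySem.List.mem_sorted]
  have hT : C.toFinset = insert (m + 3) line.toFinset := by
    rw [hCdef, List.toFinset_append, hLT]
    simp
  have hub : ∀ y ∈ line.toFinset, y ≤ m := by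
    intro y hy
    have hyL : y ∈ L := by
      rw [hLdef, PySem.List.mem_sorted]
      exact List.mem_toFinset.mp hy
    exact pvLe_getLast L hLne hLsort y hyL
  have hmT : m ∈ line.toFinset := by
    rw [← hLT]
    exact List.mem_toFinset.mpr (List.getLast_mem hLne)
  -- A's counts
  have h1 : adjCount 1 C = (line.toFinset.filter (fun y => y + 1 ∈ line.toFinset)).card := by
    rw [pvAdjChar 1 one_pos C hCsort, hT, pvF1 _ _ hub]
  have h3 : adjCount 3 C
      = (line.toFinset.filter (fun y => y + 3 ∈ line.toFinset ∧ y + 1 ∉ line.toFinset ∧ y + 2 ∉ line.toFinset)).card + 1 := by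
    rw [pvAdjChar 3 (by omega) C hCsort, hT, pvF3 _ _ hmT hub]
  -- B's side
  set s := PySem.Set.ofList line with hsdef
  have hsnd : s.Nodup := PySem.Set.nodup_ofList line
  have hsT : s.toFinset = line.toFinset := by
    ext y
    simp [hsdef, PySem.Set.mem_ofList]
  have hxmemline : x ∈ line := by
    rw [← PySem.List.mem_sorted line (fun v => v) false, ← hLdef, hLx]
    exact List.mem_cons_self
  have hsorted_eq : PySem.List.sorted line (fun v : Int => v) false = x :: t := by
    rw [← hLdef]; exact hLx
  have hxmin : ∀ y ∈ line, x ≤ y := by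
    intro y hy
    simpa using PySem.List.key_head_sorted_le line (fun v : Int => v) hsorted_eq y hy
  have hmin : ((PySem.List.min? s (fun v => v)).getD 0) = x := by
    cases hv : PySem.List.min? s (fun v => v) with
    | none =>
      exfalso
      rw [PySem.List.min?_eq_none_iff] at hv
      have hs0 : s = [] := hv
      have : x ∈ s := by rw [hsdef, PySem.Set.mem_ofList]; exact hxmemline
      rw [hs0] at this
      simp at this
    | some v =>
      have hvmem : v ∈ s := PySem.List.min?_mem hv
      have hvline : v ∈ line := by rw [hsdef, PySem.Set.mem_ofList] at hvmem; exact hvmem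
      have hxs : x ∈ s := by rw [hsdef, PySem.Set.mem_ofList]; exact hxmemline
      have h1 : x ≤ v := hxmin v hvline
      have h2 : v ≤ x := PySem.List.min?_isMin hv x hxs
      simp [le_antisymm h2 h1]
  have hc1 : s.countP (fun y => PySem.Set.contains s (y + 1))
      = (line.toFinset.filter (fun y => y + 1 ∈ line.toFinset)).card := by
    rw [pvCountP_card s hsnd, hsT]
    congr 1
    apply Finset.filter_congr
    intro y hy
    simp [hsdef, PySem.Set.mem_ofList]
  have hc3 : s.countP (fun y => PySem.Set.contains s (y + 3)
        && !PySem.Set.contains s (y + 1) && !PySem.Set.contains s (y + 2))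
      = (line.toFinset.filter (fun y => y + 3 ∈ line.toFinset ∧ y + 1 ∉ line.toFinset ∧ y + 2 ∉ line.toFinset)).card := by
    rw [pvCountP_card s hsnd, hsT]
    congr 1
    apply Finset.filter_congr
    intro y hy
    simp [hsdef, PySem.Set.mem_ofList, and_assoc]
  rw [hC0 1, hC0 3, h1, h3, hc1, hc3, hmin]
  push_cast
  have hx1 : (x - 0 = 1) ↔ (x = 1) := by omega
  have hx3 : (x - 0 = 3) ↔ (x = 3) := by omega
  simp only [hx1, hx3]
  ring

-- ===== VERDICT (by name: the statement is the Claim_ definition above) =====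
theorem best_result_spec : Claim_equal_best_result := by
  intro line _ hne
  unfold Spec_best_result
  exact pvMain line hne
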